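-- pv_equiv track=rewrite | github.com/NguyenBuuDat-DV19/KTPMUD_DV19_CK | KTCK1.py | cau1a
-- ===== SOURCE A (Python) =====
-- def check_prime(n):
--     flag = True;
--     if (n <2):
--         flag = False
--         return flag
--
--     for p in range(2, n):
--         if n % p == 0:
--             flag = False
--             break
--     return flag
--
-- def cau1a(arr):
--     count = 0
--     for i in arr:
--         if check_prime(i):
--             count = count + 1
--     if count >= 2:
--         return True
--     return False
-- ===== SOURCE B (Python) =====
-- def _is_prime(n):
--     if n < 2:
--         return False
--     d = 2
--     while d * d <= n:
--         if n % d == 0: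
--             return False
--         d += 1
--     return True
--
-- def cau1a(arr):
--     count = 0
--     for x in arr:
--         if _is_prime(x):
--             count = count + 1
--             if count == 2:
--                 return True
--     return False
-- ===== Notes on version B (the rewrite author's own statement) =====
-- stated objective: faster
-- what changed: Primality is tested by trial division only up to sqrt(n) instead of all of 2..n-1, and the scan over the array returns as soon as the second prime is found instead of counting all primes first.
import Mathlib
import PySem

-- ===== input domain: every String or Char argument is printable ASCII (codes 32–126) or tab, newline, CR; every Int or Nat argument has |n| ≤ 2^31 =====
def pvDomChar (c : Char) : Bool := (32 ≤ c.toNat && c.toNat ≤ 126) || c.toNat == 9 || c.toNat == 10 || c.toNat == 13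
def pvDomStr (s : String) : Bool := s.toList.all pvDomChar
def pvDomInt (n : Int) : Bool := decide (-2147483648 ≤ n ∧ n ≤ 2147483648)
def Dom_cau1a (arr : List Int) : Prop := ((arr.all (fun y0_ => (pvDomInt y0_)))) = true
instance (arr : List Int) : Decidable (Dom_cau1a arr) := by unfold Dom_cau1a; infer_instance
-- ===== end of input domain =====

-- B replaces A's full trial division over 2..n-1 by trial division up to sqrt(n) and
-- stops scanning the array as soon as a second prime is found (objective: faster).


-- ===== PORT A =====
-- the for-loop 'for p in range(2, n)' of check_prime with its break: p counts up
-- from 2 and the loop stops at the first divisor found (range is iterated lazily,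
-- as in Python; the body and bounds are A's)
def checkPrimeLoop (n p : Int) : Bool :=
  if _h : p < n then
    if PySem.Int.mod n p == 0 then false else checkPrimeLoop n (p + 1)
  else true
termination_by (n - p).toNat

def check_prime (n : Int) : Bool :=
  if n < 2 then false else checkPrimeLoop n 2

def cau1a (arr : List Int) : Bool :=
  let count := arr.foldl (fun c i => if check_prime i then c + 1 else c) (0 : Int)
  if 2 ≤ count then true else false

-- ===== PORT B =====
-- the while-loop of _is_prime: d runs from 2 while d*d ≤ n
def isPrimeLoop (n d : Int) : Bool :=
  if _h : d * d ≤ n then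
    if PySem.Int.mod n d == 0 then false else isPrimeLoop n (d + 1)
  else true
termination_by (n + 1 - d).toNat
decreasing_by
  have hd : d ≤ n := by nlinarith [mul_self_nonneg d, sq_nonneg (d - 1)]
  omega

def isPrimeB (n : Int) : Bool := if n < 2 then false else isPrimeLoop n 2

-- the for-loop of B's cau1a with its early return at count == 2
def altLoop : List Int → Int → Bool
  | [], _ => false
  | x :: xs, c =>
    if isPrimeB x then
      (if c + 1 == 2 then true else altLoop xs (c + 1))
    else altLoop xs c

def cau1a_alt (arr : List Int) : Bool := altLoop arr 0

-- ===== PRECONDITION & SPEC =====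
def Spec_cau1a (arr : List Int) (out : Bool) : Prop := out = cau1a_alt arr
instance (arr : List Int) (out : Bool) : Decidable (Spec_cau1a arr out) := by unfold Spec_cau1a; infer_instance

-- ===== CLAIM (what is proved, stated in full; the proofs are below) =====
def Claim_equal_cau1a : Prop := ∀ (arr : List Int), Dom_cau1a arr → Spec_cau1a arr (cau1a arr)

-- ===== LEMMAS AND PROOFS =====

theorem checkPrimeLoop_eq (n p : Int) :
    checkPrimeLoop n p = true ↔ ∀ q, p ≤ q → q < n → ¬ q ∣ n := by
  fun_induction checkPrimeLoop n p with
  | case1 p h hmod =>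
    have hdvd : p ∣ n := by
      simpa [PySem.Int.mod_eq_zero_iff_dvd] using hmod
    simp only [Bool.false_eq_true, false_iff]
    intro hall
    exact hall p le_rfl h hdvd
  | case2 p h hmod ih =>
    have hdvd : ¬ p ∣ n := by
      simpa [PySem.Int.mod_eq_zero_iff_dvd] using hmod
    rw [ih]
    constructor
    · intro hall q hq hqn hd
      rcases eq_or_lt_of_le hq with rfl | hlt
      · exact hdvd hd
      · exact hall q (by omega) hqn hd
    · intro hall q hq
      exact hall q (by omega)
  | case3 p h =>
    simp only [true_iff]
    intro q hq hqn
    omega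

theorem isPrimeLoop_eq (n d : Int) :
    0 ≤ d → (isPrimeLoop n d = true ↔ ∀ e, d ≤ e → e * e ≤ n → ¬ e ∣ n) := by
  fun_induction isPrimeLoop n d with
  | case1 d h hmod =>
    intro hd
    have hdvd : d ∣ n := by
      simpa [PySem.Int.mod_eq_zero_iff_dvd] using hmod
    simp only [Bool.false_eq_true, false_iff]
    intro hall
    exact hall d le_rfl h hdvd
  | case2 d h hmod ih =>
    intro hd
    have hdvd : ¬ d ∣ n := by
      simpa [PySem.Int.mod_eq_zero_iff_dvd] using hmod
    rw [ih (by omega)]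
    constructor
    · intro hall e he hee hd'
      rcases eq_or_lt_of_le he with rfl | hlt
      · exact hdvd hd'
      · exact hall e (by omega) hee hd'
    · intro hall e he
      exact hall e (by omega)
  | case3 d h =>
    intro hd
    simp only [true_iff]
    intro e he hee
    exfalso
    have : d * d ≤ e * e := by nlinarith
    omega

theorem prime_eq (n : Int) : check_prime n = isPrimeB n := by
  unfold check_prime isPrimeB
  by_cases h2 : n < 2
  · simp [h2]
  · push_neg at h2
    simp only [if_neg (not_lt.mpr h2)]
    rw [Bool.eq_iff_iff, checkPrimeLoop_eq, isPrimeLoop_eq n 2 (by omega)]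
    constructor
    · intro hall e he2 hee hdvd
      have hlt : e < n := by nlinarith
      exact hall e he2 hlt hdvd
    · intro hall p hp2 hpn hdvd
      obtain ⟨q, hq⟩ := hdvd
      have hq2 : 2 ≤ q := by nlinarith
      by_cases hpp : p * p ≤ n
      · exact hall p hp2 hpp ⟨q, hq⟩
      · have hqp : q < p := by nlinarith
        have hqq : q * q ≤ n := by nlinarith
        exact hall q hq2 hqq ⟨p, by linarith [hq, mul_comm p q]⟩

theorem foldl_count (l : List Int) (c : Int) :
    l.foldl (fun c i => if check_prime i then c + 1 else c) c
      = c + (l.countP check_prime : Int) := by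
  induction l generalizing c with
  | nil => simp
  | cons x xs ih =>
    simp only [List.foldl_cons, List.countP_cons, ih]
    by_cases h : check_prime x
    · simp [h]; ring
    · simp [h]

theorem altLoop_eq (l : List Int) (c : Int) (h0 : 0 ≤ c) (h1 : c ≤ 1) :
    altLoop l c = decide (2 ≤ c + (l.countP isPrimeB : Int)) := by
  induction l generalizing c with
  | nil => simp [altLoop]; omega
  | cons x xs ih =>
    by_cases hp : isPrimeB x
    · have hc : c = 0 ∨ c = 1 := by omega
      rcases hc with rfl | rfl
      · rw [show altLoop (x :: xs) 0 = altLoop xs 1 by norm_num [altLoop, hp]]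
        rw [ih 1 (by omega) (by omega), decide_eq_decide]
        simp [hp]
        omega
      · rw [show altLoop (x :: xs) 1 = true by norm_num [altLoop, hp]]
        symm
        rw [decide_eq_true_eq]
        simp [hp]
        omega
    · rw [show altLoop (x :: xs) c = altLoop xs c by simp [altLoop, hp]]
      rw [ih c h0 h1, decide_eq_decide]
      simp [hp]

theorem countP_eq (l : List Int) : l.countP check_prime = l.countP isPrimeB := by
  apply List.countP_congr
  intro x _
  simp [prime_eq]

-- ===== VERDICT (by name: the statement is the Claim_ definition above) =====
theorem cau1a_spec : Claim_equal_cau1a := by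
  intro arr _
  unfold Spec_cau1a
  show (if 2 ≤ arr.foldl (fun c i => if check_prime i then c + 1 else c) (0 : Int) then true else false)
      = altLoop arr 0
  rw [foldl_count, altLoop_eq arr 0 (by omega) (by omega), countP_eq]
  by_cases h : 2 ≤ (0:Int) + (arr.countP isPrimeB : Int)
  · rw [if_pos (by omega), decide_eq_true h]
  · rw [if_neg (by omega), eq_comm, decide_eq_false_iff_not]
    exact h
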